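-- pv_equiv track=rewrite | github.com/MarcAntoineDumais/Advent-of-Code | 2023/src/day20.py | get_memories
-- ===== SOURCE A (Python) =====
-- def get_memories(modules):
--     flip_flop_memory = set()
--     conjunction_memory = {}
--     for name, module in modules.items():
--         if module[0] == "&":
--             conjunction_memory[name] = {}
--
--     for name, module in modules.items():
--         for destination in module[1]:
--             if destination in conjunction_memory:
--                 conjunction_memory[destination][name] = 0
--     return flip_flop_memory, conjunction_memory
-- ===== SOURCE B (Python) =====
-- def get_memories(modules):
--     conjunctions = [name for name, module in modules.items() if module[0] == "&"]
--     conjunction_memory = {c: {name: 0 for name, module in modules.items() if c in module[1]}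
--                           for c in conjunctions}
--     return set(), conjunction_memory
-- ===== Notes on version B (the rewrite author's own statement) =====
-- stated objective: alternative
-- what changed: Replaces the two-pass build (pre-seed conjunction dicts, then edge-driven fill mutating inner dicts via membership lookups) by a single nested comprehension that, for each conjunction name, scans the module list for modules whose destination list contains it (target-driven instead of edge-driven traversal).
import Mathlib
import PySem

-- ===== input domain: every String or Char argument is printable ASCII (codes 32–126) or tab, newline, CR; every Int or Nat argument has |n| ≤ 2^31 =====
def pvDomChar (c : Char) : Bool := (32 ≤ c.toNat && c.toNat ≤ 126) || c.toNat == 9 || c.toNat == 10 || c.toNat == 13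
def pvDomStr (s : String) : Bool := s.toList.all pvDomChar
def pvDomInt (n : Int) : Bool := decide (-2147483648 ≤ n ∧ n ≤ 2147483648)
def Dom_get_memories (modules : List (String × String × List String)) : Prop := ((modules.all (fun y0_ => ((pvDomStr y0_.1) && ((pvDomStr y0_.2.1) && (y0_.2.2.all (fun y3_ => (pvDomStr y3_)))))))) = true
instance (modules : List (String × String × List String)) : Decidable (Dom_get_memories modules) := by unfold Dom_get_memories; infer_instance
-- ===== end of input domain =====

-- B replaces A's edge-driven fill of pre-seeded conjunction dicts by a per-conjunction scan of the
-- module list (a nested comprehension); alternative decomposition, same return value.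

-- ===== PORT A =====
def get_memories (modules : List (String × String × List String)) : List String × (List (String × List (String × Int))) :=
  -- flip_flop_memory = set()
  let flip_flop_memory : PySem.Set String := []
  -- first loop: seed conjunction_memory with empty dicts
  let cm0 : PySem.Dict String (PySem.Dict String Int) :=
    modules.foldl (fun d p => if p.2.1 == "&" then d.insert p.1 PySem.Dict.empty else d)
      PySem.Dict.empty
  -- second loop: for each module, for each destination, conjunction_memory[destination][name] = 0
  let cm : PySem.Dict String (PySem.Dict String Int) :=
    modules.foldl (fun d p =>
      p.2.2.foldl (fun d dest =>
        if d.contains dest then d.modify dest PySem.Dict.empty (fun m => m.insert p.1 0) else d) d)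
      cm0
  (flip_flop_memory, cm.items.map (fun q => (q.1, q.2.items)))

-- ===== PORT B =====
def get_memories_alt (modules : List (String × String × List String)) : List String × (List (String × List (String × Int))) :=
  -- conjunctions = [name for name, module in modules.items() if module[0] == "&"]
  let conjunctions : List String := (modules.filter (fun p => p.2.1 == "&")).map (fun p => p.1)
  -- {c: {name: 0 for name, module in modules.items() if c in module[1]} for c in conjunctions}
  let cm : PySem.Dict String (PySem.Dict String Int) :=
    conjunctions.foldl (fun d c =>
      d.insert c (modules.foldl
        (fun m p => if p.2.2.contains c then m.insert p.1 (0 : Int) else m) PySem.Dict.empty))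
      PySem.Dict.empty
  (([] : PySem.Set String), cm.items.map (fun q => (q.1, q.2.items)))

-- ===== PRECONDITION & SPEC =====
def Spec_get_memories (modules : List (String × String × List String)) (out : List String × (List (String × List (String × Int)))) : Prop := out = get_memories_alt modules
instance (modules : List (String × String × List String)) (out : List String × (List (String × List (String × Int)))) : Decidable (Spec_get_memories modules out) := by unfold Spec_get_memories; infer_instance

-- ===== CLAIM (what is proved, stated in full; the proofs are below) =====
def Claim_equal_get_memories : Prop := ∀ (modules : List (String × String × List String)), Dom_get_memories modules → Spec_get_memories modules (get_memories modules)

-- ===== LEMMAS AND PROOFS =====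

-- get? of a fold that inserts key-dependent values
theorem get?_foldl_insert_fn (ks : List String) (f : String → PySem.Dict String Int)
    (d : PySem.Dict String (PySem.Dict String Int)) (k : String) :
    (ks.foldl (fun d c => d.insert c (f c)) d).get? k
      = if k ∈ ks then some (f k) else d.get? k := by
  induction ks generalizing d with
  | nil => simp
  | cons c ks ih =>
    simp only [List.foldl_cons, ih, List.mem_cons, PySem.Dict.get?_insert]
    by_cases hk : k = c <;> by_cases hm : k ∈ ks <;> simp [hk, hm]

-- one module's inner destination loop, pointwise on getD, and it preserves keys
theorem fill1_getD (dests : List String) (name : String)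
    (d : PySem.Dict String (PySem.Dict String Int)) (c : String) :
    (dests.foldl (fun d dest =>
        if d.contains dest then d.modify dest PySem.Dict.empty (fun m => m.insert name 0) else d) d).getD c PySem.Dict.empty
      = if c ∈ dests ∧ d.contains c = true
          then (d.getD c PySem.Dict.empty).insert name 0
          else d.getD c PySem.Dict.empty := by
  induction dests generalizing d with
  | nil => simp
  | cons dest dests ih =>
    simp only [List.foldl_cons, ih]
    by_cases hd : d.contains dest
    · simp only [hd, if_pos, PySem.Dict.contains_modify, PySem.Dict.getD_modify]
      by_cases hc : c = dest
      · subst hc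
        by_cases hm : c ∈ dests <;>
          simp [hm, hd, PySem.Dict.insert_insert_self]
      · by_cases hm : c ∈ dests <;> simp [hm, hc]
    · simp only [hd, if_neg, Bool.false_eq_true, not_false_eq_true]
      by_cases hc : c = dest
      · subst hc; simp [hd]
      · simp [hc]

theorem fill1_keys (dests : List String) (name : String)
    (d : PySem.Dict String (PySem.Dict String Int)) :
    (dests.foldl (fun d dest =>
        if d.contains dest then d.modify dest PySem.Dict.empty (fun m => m.insert name 0) else d) d).keys
      = d.keys := by
  induction dests generalizing d with
  | nil => rfl
  | cons dest dests ih =>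
    simp only [List.foldl_cons, ih]
    by_cases hd : d.contains dest <;>
      simp [hd, PySem.Dict.keys_modify, PySem.Dict.keys_insert_of_contains]

theorem fill1_contains (dests : List String) (name : String)
    (d : PySem.Dict String (PySem.Dict String Int)) (c : String) :
    (dests.foldl (fun d dest =>
        if d.contains dest then d.modify dest PySem.Dict.empty (fun m => m.insert name 0) else d) d).contains c
      = d.contains c := by
  rw [PySem.Dict.contains_eq_decide_mem_keys, PySem.Dict.contains_eq_decide_mem_keys,
    fill1_keys]

-- the whole fill loop of A, pointwise on getD
theorem fillA_getD (ms : List (String × String × List String))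
    (d : PySem.Dict String (PySem.Dict String Int)) (c : String) :
    (ms.foldl (fun d p =>
        p.2.2.foldl (fun d dest =>
          if d.contains dest then d.modify dest PySem.Dict.empty (fun m => m.insert p.1 0) else d) d) d).getD c PySem.Dict.empty
      = if d.contains c = true
          then ms.foldl (fun m p => if p.2.2.contains c then m.insert p.1 (0 : Int) else m)
                 (d.getD c PySem.Dict.empty)
          else d.getD c PySem.Dict.empty := by
  induction ms generalizing d with
  | nil => simp
  | cons p ms ih =>
    simp only [List.foldl_cons, ih, fill1_contains, fill1_getD]
    by_cases hc : d.contains c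
    · have hmem : (c ∈ p.2.2) ↔ (p.2.2.contains c = true) := by
        simp
      by_cases hm : p.2.2.contains c
      · simp [hc, hmem.mpr hm]
      · have : ¬ (c ∈ p.2.2) := fun h => hm (hmem.mp h)
        simp [hc, this]
    · simp [hc]

theorem fillA_keys (ms : List (String × String × List String))
    (d : PySem.Dict String (PySem.Dict String Int)) :
    (ms.foldl (fun d p =>
        p.2.2.foldl (fun d dest =>
          if d.contains dest then d.modify dest PySem.Dict.empty (fun m => m.insert p.1 0) else d) d) d).keys
      = d.keys := by
  induction ms generalizing d with
  | nil => rfl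
  | cons p ms ih => simp only [List.foldl_cons, ih, fill1_keys]

-- ===== VERDICT (by name: the statement is the Claim_ definition above) =====
theorem get_memories_spec : Claim_equal_get_memories := by
  intro modules _
  unfold Spec_get_memories get_memories get_memories_alt
  -- notation
  set L := modules.filter (fun p => p.2.1 == "&") with hL
  set ks := L.map (fun p => p.1) with hks
  set f : String → PySem.Dict String Int := fun c =>
    modules.foldl (fun m p => if p.2.2.contains c then m.insert p.1 (0 : Int) else m)
      PySem.Dict.empty with hf
  -- rewrite A's guarded seeding loop as a fold over the filtered list
  have hseed :
      modules.foldl (fun d p => if p.2.1 == "&" then d.insert p.1 PySem.Dict.empty else d)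
        (PySem.Dict.empty : PySem.Dict String (PySem.Dict String Int))
      = L.foldl (fun d p => d.insert p.1 PySem.Dict.empty) PySem.Dict.empty := by
    rw [hL, List.foldl_filter]
  have cm0get : ∀ k,
      (L.foldl (fun d p => d.insert p.1 PySem.Dict.empty)
        (PySem.Dict.empty : PySem.Dict String (PySem.Dict String Int))).get? k
      = if k ∈ ks then some PySem.Dict.empty else none := by
    intro k
    have h := get?_foldl_insert_fn ks (fun _ => PySem.Dict.empty) PySem.Dict.empty k
    have hfold : L.foldl (fun d p => d.insert p.1 PySem.Dict.empty)
          (PySem.Dict.empty : PySem.Dict String (PySem.Dict String Int))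
        = ks.foldl (fun d c => d.insert c PySem.Dict.empty) PySem.Dict.empty := by
      rw [hks, List.foldl_map]
    rw [hfold]; simpa using h
  set cm0 := L.foldl (fun d p => d.insert p.1 PySem.Dict.empty)
      (PySem.Dict.empty : PySem.Dict String (PySem.Dict String Int)) with hcm0
  set cmA := modules.foldl (fun d p =>
      p.2.2.foldl (fun d dest =>
        if d.contains dest then d.modify dest PySem.Dict.empty (fun m => m.insert p.1 0) else d) d)
      cm0 with hcmA
  set cmB := ks.foldl (fun d c => d.insert c (f c))
      (PySem.Dict.empty : PySem.Dict String (PySem.Dict String Int)) with hcmB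
  -- keys agree
  have hk0 : cm0.keys = PySem.Set.update ([] : List String) ks := by
    rw [hcm0]
    have := PySem.Dict.keys_foldl_insert_key L (fun p => p.1)
      (fun _ _ => (PySem.Dict.empty : PySem.Dict String Int))
      (PySem.Dict.empty : PySem.Dict String (PySem.Dict String Int))
    simpa [hks] using this
  have hkA : cmA.keys = PySem.Set.update ([] : List String) ks := by
    rw [hcmA, fillA_keys, hk0]
  have hkB : cmB.keys = PySem.Set.update ([] : List String) ks := by
    rw [hcmB]
    have := PySem.Dict.keys_foldl_insert ks (fun _ c => f c)
      (PySem.Dict.empty : PySem.Dict String (PySem.Dict String Int))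
    simpa using this
  have hkeys : cmA.keys = cmB.keys := by rw [hkA, hkB]
  -- nodup keys
  have hndA : cmA.keys.Nodup := by
    rw [hcmA, fillA_keys, hcm0]
    exact PySem.Dict.nodup_keys_foldl_insert_key L (fun p => p.1) _ _ (by simp)
  have hndB : cmB.keys.Nodup := by
    rw [hcmB]
    exact PySem.Dict.nodup_keys_foldl_insert ks _ _ (by simp)
  -- membership of keys
  have hmemA : ∀ c, cmA.contains c = true ↔ c ∈ ks := by
    intro c
    rw [PySem.Dict.contains_iff_mem_keys, hkA]
    simp [PySem.Set.mem_update]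
  -- pointwise values
  have hgetD : ∀ c ∈ cmA.keys, cmA.getD c PySem.Dict.empty = cmB.getD c PySem.Dict.empty := by
    intro c hc
    have hcin : c ∈ ks := by
      have := (hmemA c).mp ((PySem.Dict.contains_iff_mem_keys _ _).mpr hc)
      exact this
    have hA : cmA.getD c PySem.Dict.empty = f c := by
      rw [hcmA, fillA_getD]
      have hc0 : cm0.contains c = true := by
        rw [PySem.Dict.contains_eq_isSome_get?, cm0get]
        simp [hcin]
      have hv0 : cm0.getD c PySem.Dict.empty = PySem.Dict.empty := by
        rw [PySem.Dict.getD_eq_get?_getD, cm0get]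
        simp [hcin]
      rw [hc0, if_pos rfl, hv0, hf]
    have hB : cmB.getD c PySem.Dict.empty = f c := by
      rw [PySem.Dict.getD_eq_get?_getD, hcmB]
      have := get?_foldl_insert_fn ks f PySem.Dict.empty c
      rw [this, if_pos hcin]
      rfl
    rw [hA, hB]
  -- items agree, hence the results agree
  have hitems : cmA.items = cmB.items := by
    rw [PySem.Dict.items_eq_map_keys cmA hndA PySem.Dict.empty,
        PySem.Dict.items_eq_map_keys cmB hndB PySem.Dict.empty, ← hkeys]
    apply List.map_congr_left
    intro c hc
    rw [hgetD c hc]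
  simp only [hseed]
  show ((([] : List String), cmA.items.map (fun q => (q.1, q.2.items)))
      = (([] : List String), cmB.items.map (fun q => (q.1, q.2.items))))
  rw [hitems]
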